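-- pv_equiv track=rewrite | github.com/AbdullahAlNaim/Data_Structures_Algorithms | interview-01/practice-one.py | traffic
-- ===== SOURCE A (Python) =====
-- def traffic(trips):
--     results = {}
--
--     for trip in trips:
--         if "partner" not in trip or "destination" not in trip:
--             continue
--
--         partner = trip["partner"]
--         destination = trip["destination"]
--
--         if partner not in results:
--             results[partner] = {}
--
--         if destination not in results[partner]:
--             results[partner][destination] = 0
--
--         results[partner][destination] += 1
--
--     return results
-- ===== SOURCE B (Python) =====
-- def traffic(trips):
--     pairs = [(t["partner"], t["destination"]) for t in trips
--              if "partner" in t and "destination" in t]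
--     return {p: {d: pairs.count((p, d))
--                 for d in dict.fromkeys(d2 for q, d2 in pairs if q == p)}
--             for p in dict.fromkeys(q for q, _ in pairs)}
-- ===== Notes on version B (the rewrite author's own statement) =====
-- stated objective: alternative
-- what changed: A's single incremental nested-dict-building pass is replaced by a declarative group-by: collect the valid (partner, destination) pairs, then build the nested result by ordered-dedup of partners, ordered-dedup of each partner's destinations, and counting each pair in the pair list.
import Mathlib
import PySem

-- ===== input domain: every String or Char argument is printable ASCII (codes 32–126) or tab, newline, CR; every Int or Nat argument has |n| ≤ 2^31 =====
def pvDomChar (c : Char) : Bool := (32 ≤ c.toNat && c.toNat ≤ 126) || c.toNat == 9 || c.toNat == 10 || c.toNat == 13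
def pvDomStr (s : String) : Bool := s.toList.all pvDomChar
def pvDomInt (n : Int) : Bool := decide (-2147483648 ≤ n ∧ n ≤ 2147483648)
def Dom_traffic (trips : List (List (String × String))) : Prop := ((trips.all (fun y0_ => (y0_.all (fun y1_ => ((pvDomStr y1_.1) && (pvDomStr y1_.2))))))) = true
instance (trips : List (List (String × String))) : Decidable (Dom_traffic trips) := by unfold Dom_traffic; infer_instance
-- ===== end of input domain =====

-- B replaces A's one incremental nested-dict pass by a declarative group-by (dedup partners,
-- dedup each partner's destinations, count pairs); objective: alternative decomposition.

-- ===== PORT A =====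
-- one iteration of A's loop body (trip is a Python dict = assoc list, first-match lookup)
def trafficStep (results : PySem.Dict String (PySem.Dict String Int)) (trip : List (String × String)) :
    PySem.Dict String (PySem.Dict String Int) :=
  let t := PySem.Dict.mk trip
  if t.contains "partner" && t.contains "destination" then
    -- both lookups succeed here, so the '.getD ""' defaults are never used
    let partner := (t.get? "partner").getD ""
    let destination := (t.get? "destination").getD ""
    let results := if results.contains partner then results else results.insert partner PySem.Dict.empty
    let inner := results.getD partner PySem.Dict.empty
    let inner := if inner.contains destination then inner else inner.insert destination (0 : Int)
    results.insert partner (inner.insert destination (inner.getD destination 0 + 1))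
  else
    results  -- continue

def traffic (trips : List (List (String × String))) : List (String × List (String × Int)) :=
  ((trips.foldl trafficStep PySem.Dict.empty).items).map (fun q => (q.1, q.2.items))

-- ===== PORT B =====
-- the valid (partner, destination) pairs, in trip order
def trafficPairs (trips : List (List (String × String))) : List (String × String) :=
  (trips.filter (fun t => (PySem.Dict.mk t).contains "partner" && (PySem.Dict.mk t).contains "destination")).map
    (fun t => (((PySem.Dict.mk t).get? "partner").getD "", ((PySem.Dict.mk t).get? "destination").getD ""))

def traffic_alt (trips : List (List (String × String))) : List (String × List (String × Int)) :=
  let pairs := trafficPairs trips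
  (PySem.List.dedup (pairs.map (·.1))).map (fun p =>
    (p, (PySem.List.dedup ((pairs.filter (fun q => q.1 == p)).map (·.2))).map (fun d =>
          (d, (pairs.count (p, d) : Int)))))

-- ===== PRECONDITION & SPEC =====
def Spec_traffic (trips : List (List (String × String))) (out : List (String × List (String × Int))) : Prop := out = traffic_alt trips
instance (trips : List (List (String × String))) (out : List (String × List (String × Int))) : Decidable (Spec_traffic trips out) := by unfold Spec_traffic; infer_instance

-- ===== CLAIM (what is proved, stated in full; the proofs are below) =====
def Claim_equal_traffic : Prop := ∀ (trips : List (List (String × String))), Dom_traffic trips → Spec_traffic trips (traffic trips)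


-- ===== LEMMAS AND PROOFS =====

-- proof-only helpers: A's loop body on one valid (partner, destination) pair, and the
-- destinations paired with a given partner
def pvStepPair (r : PySem.Dict String (PySem.Dict String Int)) (k : String × String) :
    PySem.Dict String (PySem.Dict String Int) :=
  r.insert k.1 ((r.getD k.1 PySem.Dict.empty).insert k.2 ((r.getD k.1 PySem.Dict.empty).getD k.2 0 + 1))

def pvDests (ps : List (String × String)) (p : String) : List String :=
  (ps.filter (fun q => q.1 == p)).map (·.2)

lemma trafficStep_eq (r : PySem.Dict String (PySem.Dict String Int)) (trip : List (String × String)) :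
    trafficStep r trip =
      if ((PySem.Dict.mk trip).contains "partner" && (PySem.Dict.mk trip).contains "destination") = true
      then pvStepPair r (((PySem.Dict.mk trip).get? "partner").getD "",
                         ((PySem.Dict.mk trip).get? "destination").getD "")
      else r := by
  by_cases hc : ((PySem.Dict.mk trip).contains "partner" && (PySem.Dict.mk trip).contains "destination") = true
  · rw [if_pos hc]
    show (if ((PySem.Dict.mk trip).contains "partner" && (PySem.Dict.mk trip).contains "destination") = true
          then _ else r) = _
    rw [if_pos hc]
    set p := ((PySem.Dict.mk trip).get? "partner").getD "" with hp'
    set d := ((PySem.Dict.mk trip).get? "destination").getD "" with hd'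
    unfold pvStepPair
    by_cases hp : r.contains p = true
    · rw [if_pos hp]
      by_cases hd : (r.getD p PySem.Dict.empty).contains d = true
      · rw [if_pos hd]
      · rw [if_neg hd]
        rw [Bool.not_eq_true] at hd
        rw [PySem.Dict.insert_insert_self, PySem.Dict.getD_insert_self,
            PySem.Dict.getD_of_not_contains _ _ hd]
    · rw [if_neg hp]
      rw [Bool.not_eq_true] at hp
      rw [PySem.Dict.getD_insert_self, PySem.Dict.insert_insert_self,
          PySem.Dict.getD_of_not_contains _ _ hp]
      rw [if_neg (by simp [PySem.Dict.contains_empty])]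
      rw [PySem.Dict.getD_insert_self, PySem.Dict.insert_insert_self, PySem.Dict.getD_empty]
  · rw [if_neg hc]
    show (if ((PySem.Dict.mk trip).contains "partner" && (PySem.Dict.mk trip).contains "destination") = true
          then _ else r) = r
    rw [if_neg hc]

lemma foldl_trafficStep (trips : List (List (String × String))) :
    trips.foldl trafficStep PySem.Dict.empty = (trafficPairs trips).foldl pvStepPair PySem.Dict.empty := by
  have h : trafficStep = fun r t =>
      if ((PySem.Dict.mk t).contains "partner" && (PySem.Dict.mk t).contains "destination") = true
      then pvStepPair r (((PySem.Dict.mk t).get? "partner").getD "",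
                         ((PySem.Dict.mk t).get? "destination").getD "")
      else r := by
    funext r t; exact trafficStep_eq r t
  rw [h, PySem.List.foldl_if_eq_foldl_filter]
  unfold trafficPairs
  rw [List.foldl_map]

lemma dests_append (ps : List (String × String)) (k : String × String) (p : String) :
    pvDests (ps ++ [k]) p = pvDests ps p ++ (if k.1 == p then [k.2] else []) := by
  by_cases h : k.1 = p <;> simp [pvDests, List.filter_append, h]

lemma dests_nil_of_not_mem (ps : List (String × String)) (p : String) (h : p ∉ ps.map (·.1)) :
    pvDests ps p = [] := by
  unfold pvDests
  rw [List.filter_eq_nil_iff.mpr, List.map_nil]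
  intro q hq hq1
  exact h (List.mem_map.mpr ⟨q, hq, by simpa using hq1⟩)

lemma count_dests (ps : List (String × String)) (p : String) (d : String) :
    (pvDests ps p).count d = ps.count (p, d) := by
  induction ps with
  | nil => rfl
  | cons q t ih =>
    rcases q with ⟨a, b⟩
    by_cases h1 : a = p <;> by_cases h2 : b = d <;>
      simp [pvDests, h1, h2, Prod.ext_iff, ← ih]

lemma nested_items (ps : List (String × String)) :
    (ps.foldl pvStepPair PySem.Dict.empty).items =
      (PySem.Set.ofList (ps.map (·.1))).map
        (fun p => (p, PySem.Dict.counter (pvDests ps p))) := by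
  induction ps using List.reverseRecOn with
  | nil => rfl
  | append_singleton ps k ih =>
    rw [List.foldl_append, List.foldl_cons, List.foldl_nil]
    have hkeys : (List.foldl pvStepPair PySem.Dict.empty ps).keys =
        PySem.Set.ofList (ps.map (·.1)) := by
      have h1 : (List.foldl pvStepPair PySem.Dict.empty ps).keys =
          ((PySem.Set.ofList (ps.map (·.1))).map
            (fun p => (p, PySem.Dict.counter (pvDests ps p)))).map (·.1) := by
        show (List.foldl pvStepPair PySem.Dict.empty ps).items.map (·.1) = _
        rw [ih]
      rw [h1, List.map_map]
      exact List.map_id _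
    have hnodup : (List.foldl pvStepPair PySem.Dict.empty ps).keys.Nodup := by
      rw [hkeys]; exact PySem.Set.nodup_ofList _
    have hS' : PySem.Set.ofList ((ps ++ [k]).map (·.1)) =
        PySem.Set.add (PySem.Set.ofList (ps.map (·.1))) k.1 := by
      simp [PySem.Set.ofList_eq_foldl, List.foldl_append]
    by_cases hk : k.1 ∈ PySem.Set.ofList (ps.map (·.1))
    · -- partner already present: the entry at k.1 is updated in place
      have hcont : (List.foldl pvStepPair PySem.Dict.empty ps).contains k.1 = true := by
        rw [PySem.Dict.contains_iff_mem_keys, hkeys]; exact hk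
      have hin : (k.1, PySem.Dict.counter (pvDests ps k.1)) ∈
          (List.foldl pvStepPair PySem.Dict.empty ps).items := by
        rw [ih]; exact List.mem_map_of_mem hk
      have hgetD : (List.foldl pvStepPair PySem.Dict.empty ps).getD k.1 PySem.Dict.empty =
          PySem.Dict.counter (pvDests ps k.1) :=
        PySem.Dict.getD_of_mem_items _ hin hnodup _
      have hadd : PySem.Set.add (PySem.Set.ofList (ps.map (·.1))) k.1 =
          PySem.Set.ofList (ps.map (·.1)) := by
        simp [PySem.Set.add, PySem.Set.contains, hk]
      have hstep : pvStepPair (List.foldl pvStepPair PySem.Dict.empty ps) k =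
          (List.foldl pvStepPair PySem.Dict.empty ps).insert k.1
            ((PySem.Dict.counter (pvDests ps k.1)).insert k.2
              ((PySem.Dict.counter (pvDests ps k.1)).getD k.2 0 + 1)) := by
        show (List.foldl pvStepPair PySem.Dict.empty ps).insert k.1
            (((List.foldl pvStepPair PySem.Dict.empty ps).getD k.1 PySem.Dict.empty).insert k.2
              (((List.foldl pvStepPair PySem.Dict.empty ps).getD k.1 PySem.Dict.empty).getD k.2 0 + 1)) = _
        rw [hgetD]
      rw [hstep, PySem.Dict.items_insert_of_contains _ _ hcont, ih, hS', hadd, List.map_map]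
      apply List.map_congr_left
      intro p hp
      by_cases hpk : p = k.1
      · subst hpk
        simp only [Function.comp_apply, beq_self_eq_true, if_true, dests_append]
        rw [PySem.Dict.counter_append_singleton]
        rfl
      · have h1 : (p == k.1) = false := beq_eq_false_iff_ne.mpr hpk
        have h2 : (k.1 == p) = false := beq_eq_false_iff_ne.mpr (fun h => hpk h.symm)
        simp only [Function.comp_apply, h1, Bool.false_eq_true, if_false, dests_append, h2,
          List.append_nil]
    · -- new partner: the entry is appended at the end
      have hcont : (List.foldl pvStepPair PySem.Dict.empty ps).contains k.1 = false := by
        rw [← Bool.not_eq_true, PySem.Dict.contains_iff_mem_keys, hkeys]; exact hk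
      have hgetD : (List.foldl pvStepPair PySem.Dict.empty ps).getD k.1 PySem.Dict.empty =
          PySem.Dict.empty :=
        PySem.Dict.getD_of_not_contains _ _ hcont
      have hadd : PySem.Set.add (PySem.Set.ofList (ps.map (·.1))) k.1 =
          PySem.Set.ofList (ps.map (·.1)) ++ [k.1] := by
        simp [PySem.Set.add, PySem.Set.contains, hk]
      have hmem : k.1 ∉ ps.map (·.1) := fun h => hk ((PySem.Set.mem_ofList _ _).mpr h)
      have hdnil : pvDests ps k.1 = [] := dests_nil_of_not_mem ps k.1 hmem
      have hstep : pvStepPair (List.foldl pvStepPair PySem.Dict.empty ps) k =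
          (List.foldl pvStepPair PySem.Dict.empty ps).insert k.1
            (PySem.Dict.empty.insert k.2 (PySem.Dict.empty.getD k.2 0 + 1)) := by
        show (List.foldl pvStepPair PySem.Dict.empty ps).insert k.1
            (((List.foldl pvStepPair PySem.Dict.empty ps).getD k.1 PySem.Dict.empty).insert k.2
              (((List.foldl pvStepPair PySem.Dict.empty ps).getD k.1 PySem.Dict.empty).getD k.2 0 + 1)) = _
        rw [hgetD]
      rw [hstep, PySem.Dict.items_insert_of_not_contains _ _ hcont, ih, hS', hadd, List.map_append]
      congr 1
      · apply List.map_congr_left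
        intro p hp
        have hpk : p ≠ k.1 := fun h => hk (h ▸ hp)
        have h2 : (k.1 == p) = false := beq_eq_false_iff_ne.mpr (fun h => hpk h.symm)
        rw [dests_append]
        simp [h2]
      · simp only [List.map_cons, List.map_nil, dests_append, beq_self_eq_true, if_true,
          hdnil, List.nil_append]
        rfl

-- ===== VERDICT (by name: the statement is the Claim_ definition above) =====
theorem traffic_spec : Claim_equal_traffic := by
  intro trips _
  show traffic trips = traffic_alt trips
  unfold traffic traffic_alt
  rw [foldl_trafficStep, nested_items, List.map_map]
  apply List.map_congr_left
  intro p hp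
  simp only [Function.comp_apply]
  rw [PySem.Dict.items_counter]
  congr 1
  have hdd : PySem.List.dedup (((trafficPairs trips).filter (fun q => q.1 == p)).map (·.2)) =
      PySem.Set.ofList (pvDests (trafficPairs trips) p) := rfl
  rw [hdd]
  apply List.map_congr_left
  intro d _
  rw [count_dests]
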